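-- pv_equiv track=rewrite | github.com/hexdrift/TripleZ | src/backend/services/allocator.py | _occupant_rank_fit_score
-- ===== SOURCE A (Python) =====
-- from typing import Any, Dict, List, Optional, Tuple
--
-- def _occupant_rank_fit_score(
--     occupant_ids: list[str],
--     person_rank: str,
--     personnel_by_id: Dict[str, dict],
-- ) -> int:
--     """Score how well a person's rank fits with existing occupants.
--
--     Lower scores indicate a better fit (0 = best).
--
--     Args:
--         occupant_ids: List of person_ids currently occupying the room.
--         person_rank: The rank of the person being considered.
--         personnel_by_id: Mapping of person_id to personnel record.
--
--     Returns:
--         An integer score from 0 (identical or empty) to 2 (no overlap).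
--     """
--     occupant_ranks = {
--         str(personnel_by_id[person_id]["rank"]).strip()
--         for person_id in occupant_ids
--         if person_id in personnel_by_id
--     }
--     if not occupant_ranks or occupant_ranks == {person_rank}:
--         return 0
--     if person_rank in occupant_ranks:
--         return 1
--     return 2
-- ===== SOURCE B (Python) =====
-- def _occupant_rank_fit_score(occupant_ids, person_rank, personnel_by_id):
--     matches = [str(personnel_by_id[pid]["rank"]).strip() == person_rank
--                for pid in occupant_ids if pid in personnel_by_id]
--     n = len(matches)
--     m = sum(matches)
--     return (m < n) + (m == 0 and n > 0)
-- ===== Notes on version B (the rewrite author's own statement) =====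
-- stated objective: alternative
-- what changed: Replaces A's set construction and set-equality/membership tests by counting: build the list of per-occupant match booleans, take its length n and match count m, and compute the score as the branch-free arithmetic (m < n) + (m == 0 and n > 0).
import Mathlib
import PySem

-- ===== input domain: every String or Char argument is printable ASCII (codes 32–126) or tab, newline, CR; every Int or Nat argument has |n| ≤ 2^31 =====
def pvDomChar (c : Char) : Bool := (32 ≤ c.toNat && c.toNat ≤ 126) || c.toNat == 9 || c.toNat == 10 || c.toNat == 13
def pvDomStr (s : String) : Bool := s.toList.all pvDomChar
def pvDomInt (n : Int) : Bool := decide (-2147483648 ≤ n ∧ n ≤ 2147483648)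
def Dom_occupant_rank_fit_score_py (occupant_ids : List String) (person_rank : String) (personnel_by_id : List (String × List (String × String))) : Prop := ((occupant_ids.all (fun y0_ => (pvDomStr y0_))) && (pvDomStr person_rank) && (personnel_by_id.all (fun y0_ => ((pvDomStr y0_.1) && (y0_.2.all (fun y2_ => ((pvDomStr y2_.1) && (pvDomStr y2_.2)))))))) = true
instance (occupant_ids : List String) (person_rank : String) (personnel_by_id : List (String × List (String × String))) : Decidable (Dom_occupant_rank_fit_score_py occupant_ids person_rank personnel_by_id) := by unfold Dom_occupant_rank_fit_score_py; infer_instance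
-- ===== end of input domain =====

-- B replaces A's set construction + set-equality/membership tests by counting matches (m) among valid
-- occupants (n) and computing the score by the branch-free arithmetic (m < n) + (m == 0 and n > 0).

-- first-match lookup in an association list (Python dict lookup under the task's convention); shared by both ports
def pvLookup {α : Type} (d : List (String × α)) (k : String) : Option α :=
  (d.find? (fun p => p.1 == k)).map (·.2)

-- ===== PORT A =====
-- the stripped rank of the record for pid, if pid is a key; '.getD ""' is only reached
-- outside Pre_ (Python raises KeyError when "rank" is missing)
def pvRankOf (personnel_by_id : List (String × List (String × String))) (pid : String) : Option String :=
  (pvLookup personnel_by_id pid).map (fun rec => PySem.Str.strip ((pvLookup rec "rank").getD ""))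

def occupant_rank_fit_score_py (occupant_ids : List String) (person_rank : String) (personnel_by_id : List (String × List (String × String))) : Int :=
  let occupant_ranks : PySem.Set String :=
    PySem.Set.ofList (occupant_ids.filterMap (pvRankOf personnel_by_id))
  if occupant_ranks.isEmpty || PySem.Set.equal occupant_ranks (PySem.Set.ofList [person_rank]) then 0
  else if PySem.Set.contains occupant_ranks person_rank then 1
  else 2

-- ===== PORT B =====
def occupant_rank_fit_score_py_alt (occupant_ids : List String) (person_rank : String) (personnel_by_id : List (String × List (String × String))) : Int :=
  let matchList : List Bool :=
    occupant_ids.filterMap (fun pid =>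
      (pvLookup personnel_by_id pid).map (fun rec =>
        PySem.Str.strip ((pvLookup rec "rank").getD "") == person_rank))
  let n : Int := matchList.length
  let m : Int := matchList.count true
  (if m < n then 1 else 0) + (if m = 0 ∧ 0 < n then 1 else 0)

-- ===== PRECONDITION & SPEC =====
-- Pre_ excludes inputs where some occupant's record lacks the "rank" key: Python A raises KeyError there.
def Pre_occupant_rank_fit_score_py (occupant_ids : List String) (person_rank : String) (personnel_by_id : List (String × List (String × String))) : Prop :=
  (occupant_ids.all (fun pid =>
    match pvLookup personnel_by_id pid with
    | none => true
    | some rec => (pvLookup rec "rank").isSome)) = true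
instance (occupant_ids : List String) (person_rank : String) (personnel_by_id : List (String × List (String × String))) : Decidable (Pre_occupant_rank_fit_score_py occupant_ids person_rank personnel_by_id) := by unfold Pre_occupant_rank_fit_score_py; infer_instance

def pvWitness_occupant_rank_fit_score_py : List String × String × (List (String × List (String × String))) :=
  (["a", "b"], "x", [("a", [("rank", "x")]), ("b", [("rank", "y")])])

def Spec_occupant_rank_fit_score_py (occupant_ids : List String) (person_rank : String) (personnel_by_id : List (String × List (String × String))) (out : Int) : Prop := out = occupant_rank_fit_score_py_alt occupant_ids person_rank personnel_by_id
instance (occupant_ids : List String) (person_rank : String) (personnel_by_id : List (String × List (String × String))) (out : Int) : Decidable (Spec_occupant_rank_fit_score_py occupant_ids person_rank personnel_by_id out) := by unfold Spec_occupant_rank_fit_score_py; infer_instance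

-- ===== CLAIM (what is proved, stated in full; the proofs are below) =====
def Claim_equal_occupant_rank_fit_score_py : Prop := ∀ (occupant_ids : List String) (person_rank : String) (personnel_by_id : List (String × List (String × String))), Dom_occupant_rank_fit_score_py occupant_ids person_rank personnel_by_id → Pre_occupant_rank_fit_score_py occupant_ids person_rank personnel_by_id → Spec_occupant_rank_fit_score_py occupant_ids person_rank personnel_by_id (occupant_rank_fit_score_py occupant_ids person_rank personnel_by_id)

-- ===== LEMMAS AND PROOFS =====

-- B's match-boolean list is the pointwise (· == person_rank) image of A's rank list
theorem pvMatches_eq (ids : List String) (pr : String) (d : List (String × List (String × String))) :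
    ids.filterMap (fun pid =>
      (pvLookup d pid).map (fun rec => PySem.Str.strip ((pvLookup rec "rank").getD "") == pr))
      = (ids.filterMap (pvRankOf d)).map (· == pr) := by
  rw [List.map_filterMap]
  simp [pvRankOf, Option.map_map, Function.comp_def]

-- B as a function of the count of matches and the number of valid occupants
theorem pvAlt_eq (ids : List String) (pr : String) (d : List (String × List (String × String))) :
    occupant_rank_fit_score_py_alt ids pr d =
      (if ((ids.filterMap (pvRankOf d)).countP (· == pr) : Int) < (ids.filterMap (pvRankOf d)).length then 1 else 0)
      + (if ((ids.filterMap (pvRankOf d)).countP (· == pr) : Int) = 0 ∧ (0 : Int) < (ids.filterMap (pvRankOf d)).length then 1 else 0) := by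
  unfold occupant_rank_fit_score_py_alt
  rw [pvMatches_eq]
  simp only [List.length_map, List.count_eq_countP, List.countP_map, Function.comp_def]
  have hf : (fun x : String => (x == pr) == true) = (fun x => x == pr) := by
    funext x; cases x == pr <;> rfl
  rw [hf]

-- A with its local binding beta-reduced
theorem pvA_eq (ids : List String) (pr : String) (d : List (String × List (String × String))) :
    occupant_rank_fit_score_py ids pr d =
      (if (PySem.Set.ofList (ids.filterMap (pvRankOf d))).isEmpty
          || PySem.Set.equal (PySem.Set.ofList (ids.filterMap (pvRankOf d))) (PySem.Set.ofList [pr]) then 0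
       else if PySem.Set.contains (PySem.Set.ofList (ids.filterMap (pvRankOf d))) pr then 1 else 2) := rfl

theorem occupant_rank_fit_score_py_spec : Claim_equal_occupant_rank_fit_score_py := by
  intro ids pr d _ _
  unfold Spec_occupant_rank_fit_score_py
  rw [pvA_eq, pvAlt_eq]
  set L := ids.filterMap (pvRankOf d) with hL
  have hle : L.countP (· == pr) ≤ L.length := List.countP_le_length
  by_cases hE : L = []
  · simp [hE]
  · obtain ⟨x0, hx0⟩ := List.exists_mem_of_ne_nil L hE
    have hlen : 0 < L.length := List.length_pos_of_ne_nil hE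
    have hne : (PySem.Set.ofList L).isEmpty = false := by
      have hm0 : x0 ∈ PySem.Set.ofList L := (PySem.Set.mem_ofList L x0).2 hx0
      cases hh : (PySem.Set.ofList L).isEmpty
      · rfl
      · rw [List.isEmpty_iff] at hh; rw [hh] at hm0; simp at hm0
    by_cases hall : ∀ y ∈ L, y = pr
    · -- every valid occupant rank equals pr: both sides are 0
      have hcnt : L.countP (· == pr) = L.length :=
        List.countP_eq_length.2 (fun y hy => by simp [hall y hy])
      have hprL : pr ∈ L := hall x0 hx0 ▸ hx0
      have heq : PySem.Set.equal (PySem.Set.ofList L) (PySem.Set.ofList [pr]) = true := by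
        rw [PySem.Set.equal_iff]
        intro z
        rw [PySem.Set.mem_ofList, PySem.Set.mem_ofList]
        constructor
        · intro hz; simp [hall z hz]
        · intro hz; simp at hz; rw [hz]; exact hprL
      have h1 : ¬ ((L.countP (· == pr) : Int) < L.length) := by
        rw [hcnt]; omega
      have h2 : ¬ ((L.countP (· == pr) : Int) = 0 ∧ (0 : Int) < L.length) := by
        rw [hcnt]; omega
      rw [heq, Bool.or_true, if_pos rfl, if_neg h1, if_neg h2]
      norm_num
    · -- some valid occupant rank differs from pr
      push_neg at hall
      obtain ⟨y, hyL, hy'⟩ := hall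
      have hlt : L.countP (· == pr) < L.length := by
        rcases Nat.lt_or_ge (L.countP (· == pr)) L.length with h | h
        · exact h
        · exfalso
          have : L.countP (· == pr) = L.length := le_antisymm hle h
          have := List.countP_eq_length.1 this y hyL
          simp at this
          exact hy' this
      have heq : PySem.Set.equal (PySem.Set.ofList L) (PySem.Set.ofList [pr]) = false := by
        cases hq : PySem.Set.equal (PySem.Set.ofList L) (PySem.Set.ofList [pr])
        · rfl
        · exfalso
          have hmem := ((PySem.Set.equal_iff _ _).1 hq y).1 ((PySem.Set.mem_ofList L y).2 hyL)
          rw [PySem.Set.mem_ofList] at hmem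
          simp at hmem
          exact hy' hmem
      rw [hne, heq]
      rw [if_neg (by simp)]
      have h1 : ((L.countP (· == pr) : Int) < L.length) := by exact_mod_cast hlt
      by_cases hc : pr ∈ L
      · have hA : PySem.Set.contains (PySem.Set.ofList L) pr = true := by
          rw [PySem.Set.contains_iff, PySem.Set.mem_ofList]; exact hc
        have hpos : 0 < L.countP (· == pr) :=
          List.countP_pos_iff.2 ⟨pr, hc, by simp⟩
        have h2 : ¬ ((L.countP (· == pr) : Int) = 0 ∧ (0 : Int) < L.length) := by
          omega
        rw [if_pos hA, if_pos h1, if_neg h2]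
        norm_num
      · have hA : PySem.Set.contains (PySem.Set.ofList L) pr = false := by
          cases hq : PySem.Set.contains (PySem.Set.ofList L) pr
          · rfl
          · exact (hc ((PySem.Set.mem_ofList L pr).1 ((PySem.Set.contains_iff _ _).1 hq))).elim
        have hz : L.countP (· == pr) = 0 :=
          List.countP_eq_zero.2 (fun z hz => by
            simp only [beq_iff_eq]
            intro h; exact hc (h ▸ hz))
        rw [if_neg (by rw [hA]; simp), if_pos h1,
          if_pos ⟨by exact_mod_cast hz, by exact_mod_cast hlen⟩]
        norm_num
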